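-- pv_equiv track=rewrite | github.com/Taijii-Boy/Learning | Codewars/Some tricks and useful func/Сравнение значений списка и выявление повторяющихся.py | get_some_list
-- ===== SOURCE A (Python) =====
-- def get_some_list(some_list: list) -> list | None:
--     if len(some_list) == len(set(some_list)):
--         return None  # Списки одинаковы
--
--     result_list = []
--     for a, some_list_a in enumerate(some_list):
--         for b, some_list_b in enumerate(some_list[a + 1:]):
--             if some_list_b == some_list_a:
--                 result_list.append(some_list_a)
--     return result_list
-- ===== SOURCE B (Python) =====
-- def get_some_list(some_list: list) -> list | None:
--     # One pass with count dicts instead of the nested scan.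
--     total = {}
--     for v in some_list:
--         total[v] = total.get(v, 0) + 1
--     result_list = []
--     seen = {}
--     for v in some_list:
--         seen[v] = seen.get(v, 0) + 1
--         result_list.extend([v] * (total[v] - seen[v]))
--     return result_list if result_list else None
-- ===== Notes on version B (the rewrite author's own statement) =====
-- stated objective: alternative
-- what changed: Replaces the nested enumerate scan with a single pass that precounts occurrences in a dict and emits each value as many times as it still appears later, returning None when no duplicate was emitted.
import Mathlib
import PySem

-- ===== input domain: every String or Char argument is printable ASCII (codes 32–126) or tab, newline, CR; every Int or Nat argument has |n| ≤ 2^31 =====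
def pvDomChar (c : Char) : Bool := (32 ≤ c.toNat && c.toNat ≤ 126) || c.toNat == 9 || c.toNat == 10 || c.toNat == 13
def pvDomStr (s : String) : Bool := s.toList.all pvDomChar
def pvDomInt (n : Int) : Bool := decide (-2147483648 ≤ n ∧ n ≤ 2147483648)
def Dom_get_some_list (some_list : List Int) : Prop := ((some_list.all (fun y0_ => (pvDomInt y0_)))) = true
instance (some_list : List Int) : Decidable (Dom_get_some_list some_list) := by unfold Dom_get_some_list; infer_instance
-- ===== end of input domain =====

-- B replaces A's nested scan with a single counting pass over two dicts (alternative algorithm; same observable behaviour).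


-- ===== PORT A =====
def get_some_list (some_list : List Int) : Option (List Int) :=
  if PySem.List.len some_list = PySem.Set.len (PySem.Set.ofList some_list) then
    none
  else
    some ((PySem.List.enumerate some_list).foldl (fun result_list p =>
      (PySem.List.enumerate (PySem.List.slice some_list (some (p.1 + 1)) none)).foldl
        (fun result_list q =>
          if q.2 = p.2 then result_list ++ [p.2] else result_list)
        result_list) [])

-- ===== PORT B =====
def get_some_list_alt (some_list : List Int) : Option (List Int) :=
  let total := some_list.foldl (fun d v => d.insert v (d.getD v 0 + 1)) PySem.Dict.empty
  let st := some_list.foldl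
    (fun (st : List Int × PySem.Dict Int Int) v =>
      let s := st.2.getD v 0 + 1
      (st.1 ++ List.replicate (total.getD v 0 - s).toNat v, st.2.insert v s))
    ([], PySem.Dict.empty)
  if st.1.isEmpty then none else some st.1

-- ===== PRECONDITION & SPEC =====
def Spec_get_some_list (some_list : List Int) (out : Option (List Int)) : Prop := out = get_some_list_alt some_list
instance (some_list : List Int) (out : Option (List Int)) : Decidable (Spec_get_some_list some_list out) := by unfold Spec_get_some_list; infer_instance

-- ===== CLAIM (what is proved, stated in full; the proofs are below) =====
def Claim_equal_get_some_list : Prop := ∀ (some_list : List Int), Dom_get_some_list some_list → Spec_get_some_list some_list (get_some_list some_list)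

-- ===== LEMMAS AND PROOFS =====

/-- The common value: for each position, the element repeated once per later equal element. -/
def pvDup : List Int → List Int
  | [] => []
  | x :: t => List.replicate (t.count x) x ++ pvDup t

theorem pvDup_eq_nil_iff (xs : List Int) : pvDup xs = [] ↔ xs.Nodup := by
  induction xs with
  | nil => simp [pvDup]
  | cons x t ih =>
    simp [pvDup, List.append_eq_nil_iff, List.replicate_eq_nil_iff, ih,
      List.count_eq_zero, List.nodup_cons]

-- A's inner loop over the tail appends `count` copies of x.
theorem innerA (tail : List Int) (x : Int) (s : Int) (acc : List Int) :
    (PySem.List.enumerate tail s).foldl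
      (fun r q => if q.2 = x then r ++ [x] else r) acc
    = acc ++ List.replicate (tail.count x) x := by
  induction tail generalizing s acc with
  | nil => rw [PySem.List.enumerate_nil]; simp
  | cons y t ih =>
    rw [PySem.List.enumerate_cons]
    simp only [List.foldl_cons]
    by_cases h : y = x
    · subst h
      rw [ih]
      simp [List.count_cons_self, List.replicate_succ, List.append_assoc]
    · rw [ih]
      simp [h]

-- A's outer loop equals pvDup, generalized over the start offset.
theorem outerA (xs : List Int) : ∀ (ys : List Int) (k : Nat) (acc : List Int),
    xs.drop k = ys →
    (PySem.List.enumerate ys (k : Int)).foldl (fun r p =>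
      (PySem.List.enumerate (PySem.List.slice xs (some (p.1 + 1)) none)).foldl
        (fun r q => if q.2 = p.2 then r ++ [p.2] else r) r) acc
    = acc ++ pvDup ys := by
  intro ys
  induction ys with
  | nil => intro k acc h; simp [PySem.List.enumerate_nil, pvDup]
  | cons y t ih =>
    intro k acc h
    rw [PySem.List.enumerate_cons]
    simp only [List.foldl_cons]
    have hk1 : ((k : Int) + 1) = ((k + 1 : Nat) : Int) := by push_cast; ring
    have hdrop : xs.drop (k + 1) = t := by
      have := congrArg (List.drop 1) h
      simpa [List.drop_drop, Nat.add_comm] using this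
    have hslice : PySem.List.slice xs (some ((k : Int) + 1)) none = t := by
      rw [hk1, PySem.List.slice_from _ (by positivity)]
      simpa using hdrop
    rw [hslice, innerA, hk1, ih (k + 1) _ hdrop]
    simp [pvDup, List.append_assoc]

-- B's pass equals pvDup, with the seen dict tracking prefix counts.
theorem passB (L : List Int) (T : PySem.Dict Int Int)
    (hT : ∀ v, T.getD v 0 = (L.count v : Int)) :
    ∀ (suffix pre acc : List Int) (seen : PySem.Dict Int Int),
    pre ++ suffix = L →
    (∀ v, seen.getD v 0 = (pre.count v : Int)) →
    (suffix.foldl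
      (fun (st : List Int × PySem.Dict Int Int) v =>
        (st.1 ++ List.replicate (T.getD v 0 - (st.2.getD v 0 + 1)).toNat v,
          st.2.insert v (st.2.getD v 0 + 1)))
      (acc, seen)).1
    = acc ++ pvDup suffix := by
  intro suffix
  induction suffix with
  | nil => intro pre acc seen hL hseen; simp [pvDup]
  | cons v t ih =>
    intro pre acc seen hL hseen
    simp only [List.foldl_cons]
    have hcnt : (T.getD v 0 - (seen.getD v 0 + 1)).toNat = t.count v := by
      rw [hT, hseen, ← hL]
      simp [List.count_append]
    have hseen' : ∀ w, (seen.insert v (seen.getD v 0 + 1)).getD w 0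
        = ((pre ++ [v]).count w : Int) := by
      intro w
      rw [PySem.Dict.getD_insert]
      by_cases hw : w = v
      · subst hw; simp [hseen, List.count_append]
      · simp [hw, hseen, List.count_append, Ne.symm hw]
    have hL' : (pre ++ [v]) ++ t = L := by simpa using hL
    rw [hcnt, ih (pre ++ [v]) _ _ hL' hseen']
    simp [pvDup]

theorem getA (xs : List Int) :
    get_some_list xs = if xs.Nodup then none else some (pvDup xs) := by
  unfold get_some_list
  have hcond : (PySem.List.len xs = PySem.Set.len (PySem.Set.ofList xs)) ↔ xs.Nodup := by
    constructor
    · intro h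
      have hlen : (PySem.Set.ofList xs).length = xs.length := by
        simp [PySem.List.len, PySem.Set.len] at h
        omega
      have hfin : (PySem.Set.ofList xs).toFinset = xs.toFinset := by
        ext a
        simp [List.mem_toFinset, PySem.Set.mem_ofList]
      have h1 : xs.toFinset.card = xs.length := by
        rw [← hfin, List.toFinset_card_of_nodup (PySem.Set.nodup_ofList xs), hlen]
      have h2 := Multiset.toFinset_card_eq_card_iff_nodup.mp (by simpa using h1)
      simpa using h2
    · intro h
      simp [PySem.List.len, PySem.Set.len, PySem.Set.ofList_eq_self_of_nodup _ h]
  have houter := outerA xs xs 0 [] (by simp)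
  push_cast at houter
  rw [houter]
  simp only [List.nil_append]
  by_cases h : xs.Nodup
  · rw [if_pos (hcond.mpr h), if_pos h]
  · rw [if_neg (fun hc => h (hcond.mp hc)), if_neg h]

theorem getB (xs : List Int) :
    get_some_list_alt xs = if xs.Nodup then none else some (pvDup xs) := by
  simp only [get_some_list_alt]
  have htot : ∀ v, (xs.foldl (fun d v => d.insert v (d.getD v 0 + 1)) PySem.Dict.empty).getD v 0 = (xs.count v : Int) := by
    intro v
    rw [PySem.Dict.foldl_insert_getD_add_one_eq_counter, PySem.Dict.getD_counter]
  rw [passB xs _ htot xs [] [] PySem.Dict.empty (by simp) (by simp)]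
  simp only [List.nil_append]
  by_cases h : xs.Nodup
  · simp [(pvDup_eq_nil_iff xs).2 h, h]
  · have : ¬ pvDup xs = [] := fun e => h ((pvDup_eq_nil_iff xs).1 e)
    simp [List.isEmpty_iff, this, h]

-- ===== VERDICT (by name: the statement is the Claim_ definition above) =====
theorem get_some_list_spec : Claim_equal_get_some_list := by
  intro xs _
  unfold Spec_get_some_list
  rw [getA, getB]
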